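-- pv_equiv track=rewrite | github.com/liuzihaokiwi-sketch/sakura-travel | app/domains/planning/report_generator.py | _calc_secondary_area
-- ===== SOURCE A (Python) =====
-- def _calc_secondary_area(items: list[dict]) -> str:
--     """第二高频 area（与主区域不同）"""
--     from collections import Counter
--     areas = [it.get("area", "") for it in items if it.get("area")]
--     if not areas:
--         return ""
--     counter = Counter(areas).most_common(3)
--     primary = counter[0][0] if counter else ""
--     for area, _ in counter[1:]:
--         if area != primary:
--             return area
--     return ""
-- ===== SOURCE B (Python) =====
-- def _calc_secondary_area(items: list[dict]) -> str:
--     """第二高频 area（与主区域不同）: one pass of counting, then two linear argmax scans."""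
--     counts = {}
--     for it in items:
--         a = it.get("area", "")
--         if a:
--             counts[a] = counts.get(a, 0) + 1
--     best = ("", 0)
--     for kv in counts.items():
--         if kv[1] > best[1]:
--             best = kv
--     second = ("", 0)
--     for kv in counts.items():
--         if kv[0] != best[0] and kv[1] > second[1]:
--             second = kv
--     return second[0]
-- ===== Notes on version B (the rewrite author's own statement) =====
-- stated objective: alternative
-- what changed: Replaces Counter(...).most_common(3) plus a scan of the top-3 list by a single counting pass over items followed by two linear argmax scans (strict '>' keeps the first-seen among ties), so no sorting/heap step at all.
import Mathlib
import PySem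

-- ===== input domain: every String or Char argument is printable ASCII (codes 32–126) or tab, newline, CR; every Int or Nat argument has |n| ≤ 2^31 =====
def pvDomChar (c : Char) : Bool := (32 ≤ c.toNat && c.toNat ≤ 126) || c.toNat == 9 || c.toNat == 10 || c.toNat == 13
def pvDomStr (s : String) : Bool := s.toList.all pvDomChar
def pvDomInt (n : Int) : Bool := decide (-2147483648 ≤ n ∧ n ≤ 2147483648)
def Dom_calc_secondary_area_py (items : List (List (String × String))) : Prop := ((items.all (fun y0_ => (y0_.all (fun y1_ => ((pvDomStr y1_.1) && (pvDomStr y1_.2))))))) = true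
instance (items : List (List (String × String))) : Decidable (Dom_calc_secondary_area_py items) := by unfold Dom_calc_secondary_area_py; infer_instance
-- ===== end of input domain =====

-- B replaces Counter(...).most_common(3) + a scan of that top list by one counting pass and
-- two linear argmax scans over the count table (alternative decomposition, no sort/heap step).

-- ===== PORT A =====
-- the 'for area, _ in counter[1:]: if area != primary: return area / return ""' loop
def aSecLoop : List (String × Int) → String → String
  | [], _ => ""
  | (area, _) :: rest, primary => if area ≠ primary then area else aSecLoop rest primary

def calc_secondary_area_py (items : List (List (String × String))) : String :=
  let areas := (items.filter (fun it => (PySem.Dict.mk it).getD "area" "" ≠ "")).map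
      (fun it => (PySem.Dict.mk it).getD "area" "")
  if areas = [] then ""
  else
    let counter := (PySem.List.sorted (PySem.Dict.counter areas).items (fun p => p.2) true).take 3
    let primary := match counter with
      | [] => ""
      | p :: _ => p.1
    aSecLoop (counter.drop 1) primary

-- ===== PORT B =====
def calc_secondary_area_py_alt (items : List (List (String × String))) : String :=
  let counts := items.foldl (fun d it =>
      let a := (PySem.Dict.mk it).getD "area" ""
      if a ≠ "" then d.insert a (d.getD a 0 + 1) else d) PySem.Dict.empty
  let best := counts.items.foldl (fun (best : String × Int) kv => if kv.2 > best.2 then kv else best) ("", 0)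
  let second := counts.items.foldl (fun (second : String × Int) kv =>
      if kv.1 ≠ best.1 ∧ kv.2 > second.2 then kv else second) ("", 0)
  second.1

-- ===== PRECONDITION & SPEC =====
def Spec_calc_secondary_area_py (items : List (List (String × String))) (out : String) : Prop := out = calc_secondary_area_py_alt items
instance (items : List (List (String × String))) (out : String) : Decidable (Spec_calc_secondary_area_py items out) := by unfold Spec_calc_secondary_area_py; infer_instance

-- ===== CLAIM (what is proved, stated in full; the proofs are below) =====
def Claim_equal_calc_secondary_area_py : Prop := ∀ (items : List (List (String × String))), Dom_calc_secondary_area_py items → Spec_calc_secondary_area_py items (calc_secondary_area_py items)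

-- ===== LEMMAS AND PROOFS =====

-- proof-only name for B's strict-'>' argmax scan
def scanMax (L : List (String × Int)) (b : String × Int) : String × Int :=
  L.foldl (fun b kv => if kv.2 > b.2 then kv else b) b

lemma scanMax_append_singleton (L : List (String × Int)) (x b : String × Int) :
    scanMax (L ++ [x]) b = if x.2 > (scanMax L b).2 then x else scanMax L b := by
  simp only [scanMax, List.foldl_append, List.foldl_cons, List.foldl_nil]

lemma insertBy_cons (bef : (String × Int) → (String × Int) → Bool) (x y : String × Int)
    (ys : List (String × Int)) :
    PySem.List.insertBy bef x (y :: ys)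
    = if bef x y then x :: y :: ys else y :: PySem.List.insertBy bef x ys := rfl

-- B's conditional counting loop over items equals the unconditional counting loop over A's filtered area list.
lemma condfold (items : List (List (String × String))) (e : PySem.Dict String Int) :
    items.foldl (fun d it =>
      let a := (PySem.Dict.mk it).getD "area" ""
      if a ≠ "" then d.insert a (d.getD a 0 + 1) else d) e
    = ((items.filter (fun it => (PySem.Dict.mk it).getD "area" "" ≠ "")).map
        (fun it => (PySem.Dict.mk it).getD "area" "")).foldl
        (fun d a => d.insert a (d.getD a 0 + 1)) e := by
  induction items generalizing e with
  | nil => rfl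
  | cons it rest ih =>
    simp only [List.foldl_cons, List.filter_cons]
    rw [ih]
    by_cases h : (PySem.Dict.mk it).getD "area" "" = "" <;> simp [h]

-- head of the stable reverse sort = the first-max scan with strict '>' (positive values)
lemma head_sorted_scan (L : List (String × Int)) (hne : L ≠ []) (hpos : ∀ p ∈ L, 0 < p.2) :
    ∃ t, PySem.List.sorted L (fun p => p.2) true = scanMax L ("", 0) :: t := by
  induction L using List.reverseRecOn with
  | nil => exact absurd rfl hne
  | append_singleton L x ih =>
    rcases eq_or_ne L [] with rfl | hL
    · refine ⟨[], ?_⟩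
      have hx : (0 : Int) < x.2 := hpos x (by simp)
      rw [List.nil_append]
      have hs : scanMax [x] ("", 0) = x := by
        simp only [scanMax, List.foldl_cons, List.foldl_nil]
        exact if_pos hx
      rw [hs]
      rfl
    · obtain ⟨t, ht⟩ := ih hL (fun p hp => hpos p (by simp [hp]))
      rw [PySem.List.sorted_rev_eq_foldl_insertBy] at ht ⊢
      rw [List.foldl_append, ht, scanMax_append_singleton]
      by_cases h : (scanMax L ("", 0)).2 < x.2
      · exact ⟨scanMax L ("", 0) :: t, by simp [PySem.List.insertBy, h]⟩
      · exact ⟨PySem.List.insertBy (fun a b => decide (b.2 < a.2)) x t,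
          by simp [PySem.List.insertBy, h]⟩

-- the tail of the stable reverse sort is the sort with the head element removed
lemma tail_sorted_erase (L : List (String × Int)) (hnd : L.Nodup) (m : String × Int)
    (t : List (String × Int))
    (h : PySem.List.sorted L (fun p => p.2) true = m :: t) :
    t = PySem.List.sorted (L.erase m) (fun p => p.2) true := by
  induction L using List.reverseRecOn generalizing m t with
  | nil => simp [show PySem.List.sorted ([] : List (String × Int)) (fun p => p.2) true = [] from rfl] at h
  | append_singleton L x ih =>
    rcases eq_or_ne L [] with rfl | hL
    · rw [List.nil_append] at h ⊢
      have hx : PySem.List.sorted [x] (fun p : String × Int => p.2) true = [x] := rfl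
      rw [hx] at h
      obtain ⟨rfl, rfl⟩ := List.cons_eq_cons.mp h
      rw [List.erase_cons_head]
      rfl
    · have hx : x ∉ L := fun hxL => (List.disjoint_of_nodup_append hnd) hxL (by simp)
      have hndL : L.Nodup := (List.nodup_append.mp hnd).1
      obtain ⟨m0, t0, h0⟩ : ∃ m0 t0, PySem.List.sorted L (fun p : String × Int => p.2) true = m0 :: t0 := by
        rcases hS : PySem.List.sorted L (fun p : String × Int => p.2) true with _ | ⟨m0, t0⟩
        · exact absurd ((PySem.List.sorted_eq_nil_iff L _ true).mp hS) hL
        · exact ⟨m0, t0, rfl⟩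
      have hm0L : m0 ∈ L := (PySem.List.mem_sorted L (fun p : String × Int => p.2) true m0).mp
        (by rw [h0]; simp)
      rw [PySem.List.sorted_rev_eq_foldl_insertBy, List.foldl_append,
        ← PySem.List.sorted_rev_eq_foldl_insertBy, h0] at h
      rw [List.foldl_cons, List.foldl_nil] at h
      by_cases hb : m0.2 < x.2
      · -- x inserted at the front: m = x, t = m0 :: t0
        rw [insertBy_cons, if_pos (by simpa using hb)] at h
        obtain ⟨rfl, rfl⟩ := List.cons_eq_cons.mp h
        rw [List.erase_append_right _ hx]
        simp [h0]
      · rw [insertBy_cons, if_neg (by simpa using hb)] at h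
        obtain ⟨rfl, rfl⟩ := List.cons_eq_cons.mp h
        rw [List.erase_append_left _ hm0L,
          PySem.List.sorted_rev_eq_foldl_insertBy, List.foldl_append,
          ← PySem.List.sorted_rev_eq_foldl_insertBy, ← ih hndL m0 t0 h0]
        rfl

-- the key-skipping argmax scan equals the plain argmax scan over the filtered list
lemma skip_filter (L : List (String × Int)) (prim : String) (b : String × Int) :
    L.foldl (fun s kv => if kv.1 ≠ prim ∧ kv.2 > s.2 then kv else s) b
    = (L.filter (fun kv => kv.1 ≠ prim)).foldl (fun s kv => if kv.2 > s.2 then kv else s) b := by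
  induction L generalizing b with
  | nil => rfl
  | cons kv rest ih =>
    by_cases hk : kv.1 = prim
    · simp [hk, ih]
    · by_cases hv : kv.2 > b.2 <;> simp [hk, hv, ih]

-- with nodup keys, filtering away an element's key is erasing that element
lemma filter_key_eq_erase (L : List (String × Int)) (hnd : (L.map (·.1)).Nodup)
    (m : String × Int) (hm : m ∈ L) :
    L.filter (fun kv => kv.1 ≠ m.1) = L.erase m := by
  induction L with
  | nil => cases hm
  | cons p rest ih =>
    simp only [List.map_cons, List.nodup_cons] at hnd
    rcases List.mem_cons.mp hm with h1 | hm'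
    · subst h1
      rw [List.erase_cons_head, List.filter_cons_of_neg (by simp)]
      refine List.filter_eq_self.mpr (fun kv hkv => ?_)
      have : kv.1 ≠ m.1 := fun he => hnd.1 (he ▸ List.mem_map.mpr ⟨kv, hkv, rfl⟩)
      simpa using this
    · have hne1 : p.1 ≠ m.1 := fun he => hnd.1 (he ▸ List.mem_map.mpr ⟨m, hm', rfl⟩)
      have hne : p ≠ m := fun he => hne1 (by rw [he])
      rw [List.erase_cons_tail (by simpa using hne),
        List.filter_cons_of_pos (by simpa using hne1), ih hnd.2 hm']

-- ===== VERDICT (by name: the statement is the Claim_ definition above) =====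
theorem calc_secondary_area_py_spec : Claim_equal_calc_secondary_area_py := by
  intro items _
  unfold Spec_calc_secondary_area_py
  simp only [calc_secondary_area_py, calc_secondary_area_py_alt]
  set areas := (items.filter (fun it => (PySem.Dict.mk it).getD "area" "" ≠ "")).map
      (fun it => (PySem.Dict.mk it).getD "area" "") with hareas
  have hcounts : (items.foldl (fun d it =>
      let a := (PySem.Dict.mk it).getD "area" ""
      if a ≠ "" then d.insert a (d.getD a 0 + 1) else d) PySem.Dict.empty)
      = PySem.Dict.counter areas := by
    rw [condfold]
    exact PySem.Dict.foldl_insert_getD_add_one_eq_counter areas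
  rw [hcounts]
  set L := (PySem.Dict.counter areas).items with hLdef
  by_cases hA0 : areas = []
  · rw [if_pos hA0]
    have : L = [] := by rw [hLdef, hA0]; rfl
    rw [this]
    rfl
  · rw [if_neg hA0]
    -- basic facts about L
    have hLne : L ≠ [] := by
      obtain ⟨a, as, he⟩ := List.exists_cons_of_ne_nil hA0
      intro h0
      rw [hLdef, PySem.Dict.items_counter] at h0
      have ha : a ∈ PySem.Set.ofList areas := (PySem.Set.mem_ofList areas a).mpr (by rw [he]; simp)
      rw [List.map_eq_nil_iff.mp h0] at ha
      cases ha
    have hpos : ∀ p ∈ L, 0 < p.2 := by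
      rw [hLdef, PySem.Dict.items_counter]
      intro p hp
      obtain ⟨k, hk, rfl⟩ := List.mem_map.mp hp
      have : k ∈ areas := (PySem.Set.mem_ofList areas k).mp hk
      show (0 : Int) < ((List.count k areas : Nat) : Int)
      exact_mod_cast List.count_pos_iff.mpr this
    have hndk : (L.map (·.1)).Nodup := by
      have := PySem.Dict.nodup_keys_counter areas
      simpa [PySem.Dict.keys] using this
    have hndL : L.Nodup := hndk.of_map _
    obtain ⟨t, ht⟩ := head_sorted_scan L hLne hpos
    have hbest : L.foldl (fun (best : String × Int) kv => if kv.2 > best.2 then kv else best) ("", 0)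
        = scanMax L ("", 0) := rfl
    set m := scanMax L ("", 0) with hmdef
    have hmL : m ∈ L := (PySem.List.mem_sorted L (fun p => p.2) true m).mp (by rw [ht]; simp)
    have htail : t = PySem.List.sorted (L.erase m) (fun p => p.2) true :=
      tail_sorted_erase L hndL m t ht
    have hfe : L.filter (fun kv => kv.1 ≠ m.1) = L.erase m := filter_key_eq_erase L hndk m hmL
    have hsecond : L.foldl (fun (second : String × Int) kv =>
        if kv.1 ≠ m.1 ∧ kv.2 > second.2 then kv else second) ("", 0)
        = scanMax (L.erase m) ("", 0) := by
      rw [skip_filter, hfe]; rfl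
    rw [ht, hbest, List.take_succ_cons, List.drop_succ_cons, List.drop_zero, hsecond]
    by_cases h2 : L.erase m = []
    · have ht0 : t = [] := by rw [htail, h2]; rfl
      rw [ht0, h2]
      rfl
    · obtain ⟨t2, ht2⟩ := head_sorted_scan (L.erase m) h2
        (fun p hp => hpos p (List.mem_of_mem_erase hp))
      have ht' : t = scanMax (L.erase m) ("", 0) :: t2 := by rw [htail, ht2]
      set m' := scanMax (L.erase m) ("", 0) with hm'def
      have hm'mem : m' ∈ L.erase m :=
        (PySem.List.mem_sorted (L.erase m) (fun p => p.2) true m').mp (by rw [ht2]; simp)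
      have hm'ne : m'.1 ≠ m.1 := by
        rw [← hfe] at hm'mem
        simpa using (List.of_mem_filter hm'mem)
      rw [ht', List.take_succ_cons]
      simp [aSecLoop, hm'ne]
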